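-- pv_equiv track=rewrite | github.com/da0ab/vim-caramel | scripts/p.py | wrap_in_paragraphs
-- ===== SOURCE A (Python) =====
-- def wrap_in_paragraphs(text):
--     lines = text.split('\n')
--     wrapped_text = ''
--     is_in_paragraph = False
--
--     for line in lines:
--         line = line.strip()
--         if line:
--             if is_in_paragraph:
--                 wrapped_text += f'<br>\n{line}'
--             else:
--                 wrapped_text += f'<p>{line}'
--                 is_in_paragraph = True
--         else:
--             if is_in_paragraph:
--                 wrapped_text += '</p>\n\n'
--                 is_in_paragraph = False
--
--     if is_in_paragraph:
--         wrapped_text += '</p>'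
--
--     return wrapped_text
-- ===== SOURCE B (Python) =====
-- def wrap_in_paragraphs(text):
--     # Group-first decomposition: collect paragraphs (runs of non-blank stripped
--     # lines) in one pass, then render each closed paragraph and the trailing
--     # still-open one.
--     paragraphs = []   # paragraphs that were followed by a blank line
--     current = []      # paragraph still being collected
--     for raw in text.split('\n'):
--         line = raw.strip()
--         if line:
--             current.append(line)
--         elif current:
--             paragraphs.append(current)
--             current = []
--     closed = ''.join('<p>' + '<br>\n'.join(p) + '</p>\n\n' for p in paragraphs)
--     if current:
--         return closed + '<p>' + '<br>\n'.join(current) + '</p>'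
--     return closed
-- ===== Notes on version B (the rewrite author's own statement) =====
-- stated objective: alternative
-- what changed: Replaces A's line-by-line open/close paragraph state machine (building the output string incrementally with an is_in_paragraph flag) by a group-first pass that collects the paragraphs as runs of non-blank stripped lines and then renders each closed paragraph and the trailing open one with joins.
import Mathlib
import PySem

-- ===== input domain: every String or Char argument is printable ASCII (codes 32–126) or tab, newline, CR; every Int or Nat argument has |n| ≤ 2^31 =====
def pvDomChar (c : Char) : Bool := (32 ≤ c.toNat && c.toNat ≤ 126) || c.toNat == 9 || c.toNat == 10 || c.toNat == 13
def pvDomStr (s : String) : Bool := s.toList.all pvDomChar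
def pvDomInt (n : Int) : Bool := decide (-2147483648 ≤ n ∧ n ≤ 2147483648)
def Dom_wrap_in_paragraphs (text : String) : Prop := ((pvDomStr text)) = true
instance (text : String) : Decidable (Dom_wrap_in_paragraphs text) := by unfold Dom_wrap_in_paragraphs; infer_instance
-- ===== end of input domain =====

-- B replaces A's line-by-line open/close state machine by a group-first pass
-- (collect the paragraphs as runs of non-blank stripped lines, then render them);
-- objective: alternative decomposition.

-- ===== PORT A =====
-- loop body of A's `for line in lines`, state = (wrapped_text, is_in_paragraph)
def pvAStep (st : List Char × Bool) (raw : List Char) : List Char × Bool :=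
  let line := PySem.Chars.strip raw
  if line ≠ [] then
    if st.2 then (st.1 ++ "<br>\n".toList ++ line, st.2)
    else (st.1 ++ "<p>".toList ++ line, true)
  else
    if st.2 then (st.1 ++ "</p>\n\n".toList, false) else st

def wrap_in_paragraphs (text : String) : String :=
  let lines := PySem.Chars.splitOn text.toList ['\n']
  let st := lines.foldl pvAStep ([], false)
  String.ofList (if st.2 then st.1 ++ "</p>".toList else st.1)

-- ===== PORT B =====
-- loop body of B's `for raw in text.split('\n')`, state = (paragraphs, current)
def pvBStep (st : List (List (List Char)) × List (List Char)) (raw : List Char) :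
    List (List (List Char)) × List (List Char) :=
  let line := PySem.Chars.strip raw
  if line ≠ [] then (st.1, st.2 ++ [line])
  else if st.2 ≠ [] then (st.1 ++ [st.2], []) else st

def wrap_in_paragraphs_alt (text : String) : String :=
  let st := (PySem.Chars.splitOn text.toList ['\n']).foldl pvBStep ([], [])
  let closed := PySem.Chars.join []
    (st.1.map (fun p => "<p>".toList ++ PySem.Chars.join "<br>\n".toList p ++ "</p>\n\n".toList))
  String.ofList (if st.2 ≠ [] then
      closed ++ "<p>".toList ++ PySem.Chars.join "<br>\n".toList st.2 ++ "</p>".toList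
    else closed)

-- ===== PRECONDITION & SPEC =====
def Spec_wrap_in_paragraphs (text : String) (out : String) : Prop := out = wrap_in_paragraphs_alt text
instance (text : String) (out : String) : Decidable (Spec_wrap_in_paragraphs text out) := by unfold Spec_wrap_in_paragraphs; infer_instance

-- ===== CLAIM (what is proved, stated in full; the proofs are below) =====
def Claim_equal_wrap_in_paragraphs : Prop := ∀ (text : String), Dom_wrap_in_paragraphs text → Spec_wrap_in_paragraphs text (wrap_in_paragraphs text)

-- ===== LEMMAS AND PROOFS =====

-- rendering of one of B's finished paragraphs
def pvRender1 (p : List (List Char)) : List Char :=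
  "<p>".toList ++ PySem.Chars.join "<br>\n".toList p ++ "</p>\n\n".toList

def pvClosed (paras : List (List (List Char))) : List Char :=
  PySem.Chars.join [] (paras.map pvRender1)

-- A's accumulated text for a still-open paragraph `cur`
def pvOpen (cur : List (List Char)) : List Char :=
  if cur = [] then [] else "<p>".toList ++ PySem.Chars.join "<br>\n".toList cur

-- B's final rendering from a loop state
def pvFinB (st : List (List (List Char)) × List (List Char)) : List Char :=
  pvClosed st.1 ++ (if st.2 ≠ [] then
    "<p>".toList ++ PySem.Chars.join "<br>\n".toList st.2 ++ "</p>".toList else [])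

-- A's final step from a loop state
def pvFinA (st : List Char × Bool) : List Char :=
  if st.2 then st.1 ++ "</p>".toList else st.1

lemma pvJoin_nil_append (xs : List (List Char)) (x : List Char) :
    PySem.Chars.join [] (xs ++ [x]) = PySem.Chars.join [] xs ++ x := by
  induction xs with
  | nil => simp [PySem.Chars.join_nil, PySem.Chars.join_singleton]
  | cons a rest ih =>
    cases rest with
    | nil => simp [PySem.Chars.join_singleton, PySem.Chars.join_cons_cons]
    | cons b t =>
      simp only [List.cons_append] at ih ⊢
      rw [PySem.Chars.join_cons_cons [] a b (t ++ [x]), ih,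
          PySem.Chars.join_cons_cons [] a b t]
      simp [List.append_assoc]

lemma pvJoin_append_singleton (sep x : List Char) (cur : List (List Char))
    (h : cur ≠ []) :
    PySem.Chars.join sep (cur ++ [x]) = PySem.Chars.join sep cur ++ sep ++ x := by
  induction cur with
  | nil => exact absurd rfl h
  | cons a rest ih =>
    cases rest with
    | nil => simp [PySem.Chars.join_singleton, PySem.Chars.join_cons_cons]
    | cons b t =>
      simp only [List.cons_append] at ih ⊢
      rw [PySem.Chars.join_cons_cons sep a b (t ++ [x]), ih (by simp),
          PySem.Chars.join_cons_cons sep a b t]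
      simp [List.append_assoc]

lemma pvClosed_append (paras : List (List (List Char))) (p : List (List Char)) :
    pvClosed (paras ++ [p]) = pvClosed paras ++ pvRender1 p := by
  simp [pvClosed, pvJoin_nil_append]

-- the coupling invariant between A's fold state and B's fold state
lemma pvInv (ls : List (List Char)) : ∀ (paras : List (List (List Char))) (cur : List (List Char)),
    pvFinA (ls.foldl pvAStep (pvClosed paras ++ pvOpen cur, !cur.isEmpty))
      = pvFinB (ls.foldl pvBStep (paras, cur)) := by
  induction ls with
  | nil =>
    intro paras cur
    cases cur with
    | nil => simp [pvFinA, pvFinB, pvOpen]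
    | cons c cs => simp [pvFinA, pvFinB, pvOpen, List.append_assoc]
  | cons raw rest ih =>
    intro paras cur
    rw [List.foldl_cons, List.foldl_cons]
    by_cases hs : PySem.Chars.strip raw = []
    · by_cases hc : cur = []
      · subst hc
        rw [show pvAStep (pvClosed paras ++ pvOpen [], !(([] : List (List Char)).isEmpty)) raw
              = (pvClosed paras ++ pvOpen [], !(([] : List (List Char)).isEmpty)) from by
            simp [pvAStep, hs],
          show pvBStep (paras, []) raw = (paras, []) from by simp [pvBStep, hs]]
        exact ih paras []
      · rw [show pvAStep (pvClosed paras ++ pvOpen cur, !cur.isEmpty) raw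
              = (pvClosed (paras ++ [cur]) ++ pvOpen [], !(([] : List (List Char)).isEmpty)) from by
            simp [pvAStep, hs, List.isEmpty_eq_false_iff.mpr hc, pvOpen, hc,
                  pvClosed_append, pvRender1, List.append_assoc],
          show pvBStep (paras, cur) raw = (paras ++ [cur], []) from by simp [pvBStep, hs, hc]]
        exact ih (paras ++ [cur]) []
    · by_cases hc : cur = []
      · subst hc
        rw [show pvAStep (pvClosed paras ++ pvOpen [], !(([] : List (List Char)).isEmpty)) raw
              = (pvClosed paras ++ pvOpen [PySem.Chars.strip raw],
                 !([PySem.Chars.strip raw] : List (List Char)).isEmpty) from by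
            simp [pvAStep, hs, pvOpen, PySem.Chars.join_singleton],
          show pvBStep (paras, []) raw = (paras, [PySem.Chars.strip raw]) from by
            simp [pvBStep, hs]]
        exact ih paras [PySem.Chars.strip raw]
      · rw [show pvAStep (pvClosed paras ++ pvOpen cur, !cur.isEmpty) raw
              = (pvClosed paras ++ pvOpen (cur ++ [PySem.Chars.strip raw]),
                 !(cur ++ [PySem.Chars.strip raw]).isEmpty) from by
            simp [pvAStep, hs, List.isEmpty_eq_false_iff.mpr hc, pvOpen, hc,
                  pvJoin_append_singleton _ _ _ hc, List.append_assoc],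
          show pvBStep (paras, cur) raw = (paras, cur ++ [PySem.Chars.strip raw]) from by
            simp [pvBStep, hs]]
        exact ih paras (cur ++ [PySem.Chars.strip raw])

-- ===== VERDICT (by name: the statement is the Claim_ definition above) =====
theorem wrap_in_paragraphs_spec : Claim_equal_wrap_in_paragraphs := by
  intro text _
  unfold Spec_wrap_in_paragraphs wrap_in_paragraphs wrap_in_paragraphs_alt
  have h := pvInv (PySem.Chars.splitOn text.toList ['\n']) [] []
  simp only [pvClosed, pvOpen, List.map_nil, PySem.Chars.join_nil, List.nil_append,
    List.isEmpty_nil, Bool.not_true, if_pos] at h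
  have h2 : pvFinB ((PySem.Chars.splitOn text.toList ['\n']).foldl pvBStep ([], [])) =
      (if ((PySem.Chars.splitOn text.toList ['\n']).foldl pvBStep ([], [])).2 ≠ [] then
        pvClosed ((PySem.Chars.splitOn text.toList ['\n']).foldl pvBStep ([], [])).1
          ++ "<p>".toList
          ++ PySem.Chars.join "<br>\n".toList ((PySem.Chars.splitOn text.toList ['\n']).foldl pvBStep ([], [])).2
          ++ "</p>".toList
      else pvClosed ((PySem.Chars.splitOn text.toList ['\n']).foldl pvBStep ([], [])).1) := by
    unfold pvFinB; split <;> simp [List.append_assoc]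
  exact congrArg String.ofList (h.trans h2)
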